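-- pv_equiv track=rewrite | github.com/thanhndv212/agimus_spacelab | src/agimus_spacelab/planning/config.py | bfs_edge_path
-- ===== SOURCE A (Python) =====
-- from collections import deque
-- from typing import Dict, List, Optional, Tuple
--
-- def bfs_edge_path(
--     start_state: str,
--     goal_state: str,
--     edge_topology: Dict[str, Tuple[str, str]],
-- ) -> List[str]:
--     """Find a directed edge-name path from start_state to goal_state.
--
--     Args:
--         start_state: Source state name.
--         goal_state: Target state name.
--         edge_topology: Mapping edge_name -> (src_state, dst_state)
--
--     Returns:
--         List of edge names forming a path. Empty if no path exists.
--     """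
--
--     adjacency: Dict[str, List[Tuple[str, str]]] = {}
--     for edge_name, (src, dst) in edge_topology.items():
--         adjacency.setdefault(src, []).append((dst, edge_name))
--
--     queue: deque[str] = deque([start_state])
--     prev_state: Dict[str, str] = {}
--     prev_edge: Dict[str, str] = {}
--     visited = {start_state}
--
--     while queue:
--         state = queue.popleft()
--         if state == goal_state:
--             break
--         for nxt, edge_name in adjacency.get(state, []):
--             if nxt in visited:
--                 continue
--             visited.add(nxt)
--             prev_state[nxt] = state
--             prev_edge[nxt] = edge_name
--             queue.append(nxt)
--
--     if goal_state not in visited: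
--         return []
--
--     edges: List[str] = []
--     cur = goal_state
--     while cur != start_state:
--         edges.append(prev_edge[cur])
--         cur = prev_state[cur]
--     edges.reverse()
--     return edges
-- ===== SOURCE B (Python) =====
-- def bfs_edge_path(start_state, goal_state, edge_topology):
--     """BFS without the adjacency index: scan the edge table directly per state,
--     keep the queue as a growing list read through a cursor (no pops), record a
--     single parent dict dst -> (edge, src), and rebuild the path by forward
--     recursion (no reverse)."""
--     parent = {}
--     visited = {start_state}
--     queue = [start_state]
--     i = 0
--     while i < len(queue) and queue[i] != goal_state:
--         state = queue[i]
--         i += 1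
--         for edge_name, (src, dst) in edge_topology.items():
--             if src == state and dst not in visited:
--                 visited.add(dst)
--                 parent[dst] = (edge_name, state)
--                 queue.append(dst)
--     if goal_state not in visited:
--         return []
--
--     def walk(cur):
--         if cur == start_state:
--             return []
--         edge_name, prev = parent[cur]
--         return walk(prev) + [edge_name]
--
--     return walk(goal_state)
-- ===== Notes on version B (the rewrite author's own statement) =====
-- stated objective: alternative
-- what changed: Dropped the precomputed adjacency map (BFS scans the edge table directly for each visited state, in dict order), replaced the pop-from-front deque by a growing list read through a cursor, merged the two back-pointer dicts into one parent dict dst -> (edge, src), and rebuilt the path by forward recursion instead of append-then-reverse.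
import Mathlib
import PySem

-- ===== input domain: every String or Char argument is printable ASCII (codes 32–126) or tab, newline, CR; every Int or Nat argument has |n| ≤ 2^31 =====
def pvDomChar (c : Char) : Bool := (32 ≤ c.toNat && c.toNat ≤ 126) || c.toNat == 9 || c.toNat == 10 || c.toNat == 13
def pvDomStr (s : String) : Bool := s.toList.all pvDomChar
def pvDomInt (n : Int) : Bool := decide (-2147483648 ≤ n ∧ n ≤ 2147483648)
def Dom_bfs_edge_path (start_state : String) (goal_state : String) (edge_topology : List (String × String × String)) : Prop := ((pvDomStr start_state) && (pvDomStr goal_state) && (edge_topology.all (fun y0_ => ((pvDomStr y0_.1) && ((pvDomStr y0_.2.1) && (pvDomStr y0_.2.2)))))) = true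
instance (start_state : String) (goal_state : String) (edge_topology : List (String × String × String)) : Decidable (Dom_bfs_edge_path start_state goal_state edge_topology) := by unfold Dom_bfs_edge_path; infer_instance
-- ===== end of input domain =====

-- B drops A's precomputed adjacency map (the BFS scans the edge table directly), keeps the queue
-- as a growing list read through a cursor instead of a popped deque, merges the two back-pointer
-- dicts into one parent dict, and rebuilds the path by forward recursion; same value, not faster.

-- ===== PORT A =====
-- adjacency: Dict[str, List[(dst, edge_name)]] built with setdefault(src, []).append(...)
def pvAdjA (edge_topology : List (String × String × String)) :
    PySem.Dict String (List (String × String)) :=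
  (PySem.Dict.ofList edge_topology).items.foldl
    (fun adj it => adj.modify it.2.1 [] (fun l => l ++ [(it.2.2, it.1)]))
    PySem.Dict.empty

-- body of A's inner 'for nxt, edge_name in adjacency.get(state, [])' loop;
-- acc = (prev_state, prev_edge, visited, queue)
def pvStepA (state : String)
    (acc : PySem.Dict String String × PySem.Dict String String × PySem.Set String × List String)
    (n : String × String) :
    PySem.Dict String String × PySem.Dict String String × PySem.Set String × List String :=
  if PySem.Set.contains acc.2.2.1 n.1 then acc
  else (acc.1.insert n.1 state, acc.2.1.insert n.1 n.2,
        PySem.Set.add acc.2.2.1 n.1, acc.2.2.2 ++ [n.1])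

-- A's 'while queue' loop; the fuel (#edges + 1) bounds the number of dequeues,
-- since each state is enqueued at most once
def pvLoopA (adj : PySem.Dict String (List (String × String))) (goal : String) :
    Nat → List String → PySem.Dict String String → PySem.Dict String String →
    PySem.Set String →
    PySem.Dict String String × PySem.Dict String String × PySem.Set String
  | 0, _, pS, pE, vis => (pS, pE, vis)
  | _ + 1, [], pS, pE, vis => (pS, pE, vis)
  | fuel + 1, state :: queue, pS, pE, vis =>
    if state == goal then (pS, pE, vis)
    else
      let r := (adj.getD state []).foldl (pvStepA state) (pS, pE, vis, queue)
      pvLoopA adj goal fuel r.2.2.2 r.1 r.2.1 r.2.2.1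

-- A's back-pointer reconstruction 'while cur != start_state' (append then reverse)
def pvBackA (start : String) (pS pE : PySem.Dict String String) :
    Nat → String → List String → List String
  | 0, _, edges => edges.reverse
  | fuel + 1, cur, edges =>
    if cur == start then edges.reverse
    else pvBackA start pS pE fuel (pS.getD cur "") (edges ++ [pE.getD cur ""])

def bfs_edge_path (start_state : String) (goal_state : String) (edge_topology : List (String × String × String)) : List String :=
  let adj := pvAdjA edge_topology
  let r := pvLoopA adj goal_state (edge_topology.length + 1) [start_state]
      PySem.Dict.empty PySem.Dict.empty (PySem.Set.ofList [start_state])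
  if PySem.Set.contains r.2.2 goal_state then
    pvBackA start_state r.1 r.2.1 (edge_topology.length + 1) goal_state []
  else []

-- ===== PORT B =====
-- body of B's 'for edge_name, (src, dst) in edge_topology.items()' scan;
-- acc = (parent, visited, queue); the queue only ever grows (B never pops)
def pvScanB (state : String)
    (acc : PySem.Dict String (String × String) × PySem.Set String × List String)
    (it : String × String × String) :
    PySem.Dict String (String × String) × PySem.Set String × List String :=
  if it.2.1 == state && !(PySem.Set.contains acc.2.1 it.2.2) then
    (acc.1.insert it.2.2 (it.1, state), PySem.Set.add acc.2.1 it.2.2, acc.2.2 ++ [it.2.2])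
  else acc

-- B's 'while i < len(queue) and queue[i] != goal_state' cursor loop
def pvSearchB (items : List (String × String × String)) (goal : String) :
    Nat → List String → Nat → PySem.Dict String (String × String) → PySem.Set String →
    PySem.Dict String (String × String) × PySem.Set String
  | 0, _, _, parent, vis => (parent, vis)
  | fuel + 1, q, i, parent, vis =>
    if i < q.length && !(q.getD i "" == goal) then
      let r := items.foldl (pvScanB (q.getD i "")) (parent, vis, q)
      pvSearchB items goal fuel r.2.2 (i + 1) r.1 r.2.1
    else (parent, vis)

-- B's recursive 'walk' (forward order, no reverse)
def pvWalkB (start : String) (parent : PySem.Dict String (String × String)) :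
    Nat → String → List String
  | 0, _ => []
  | fuel + 1, cur =>
    if cur == start then []
    else
      let p := parent.getD cur ("", "")
      pvWalkB start parent fuel p.2 ++ [p.1]

def bfs_edge_path_alt (start_state : String) (goal_state : String) (edge_topology : List (String × String × String)) : List String :=
  let items := (PySem.Dict.ofList edge_topology).items
  let r := pvSearchB items goal_state (edge_topology.length + 1) [start_state] 0
      PySem.Dict.empty (PySem.Set.ofList [start_state])
  if PySem.Set.contains r.2 goal_state then
    pvWalkB start_state r.1 (edge_topology.length + 1) goal_state
  else []

-- ===== PRECONDITION & SPEC =====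
def Spec_bfs_edge_path (start_state : String) (goal_state : String) (edge_topology : List (String × String × String)) (out : List String) : Prop := out = bfs_edge_path_alt start_state goal_state edge_topology
instance (start_state : String) (goal_state : String) (edge_topology : List (String × String × String)) (out : List String) : Decidable (Spec_bfs_edge_path start_state goal_state edge_topology out) := by unfold Spec_bfs_edge_path; infer_instance

-- ===== CLAIM (what is proved, stated in full; the proofs are below) =====
def Claim_equal_bfs_edge_path : Prop := ∀ (start_state : String) (goal_state : String) (edge_topology : List (String × String × String)), Dom_bfs_edge_path start_state goal_state edge_topology → Spec_bfs_edge_path start_state goal_state edge_topology (bfs_edge_path start_state goal_state edge_topology)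

-- ===== LEMMAS AND PROOFS =====

-- A's two back-pointer dicts and B's single parent dict agree on every lookup
def pvRel (pS pE : PySem.Dict String String)
    (parent : PySem.Dict String (String × String)) : Prop :=
  ∀ (c : String) (p0 : String × String),
    parent.getD c p0 = (pE.getD c p0.1, pS.getD c p0.2)

-- A's adjacency entry for a state is exactly the filtered edge list in items order
theorem pvAdjA_getD (edge_topology : List (String × String × String)) (s : String) :
    (pvAdjA edge_topology).getD s [] =
      ((PySem.Dict.ofList edge_topology).items.filter
        (fun it => it.2.1 == s)).map (fun it => (it.2.2, it.1)) := by
  unfold pvAdjA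
  rw [← List.foldl_map (f := fun (it : String × String × String) => (it.2.1, (it.2.2, it.1)))
        (g := fun (d : PySem.Dict String (List (String × String))) p =>
          d.modify p.1 [] (fun l => l ++ [p.2]))]
  rw [PySem.Dict.getD_foldl_modify_append]
  simp [PySem.Dict.getD_empty, List.filter_map, List.map_map, Function.comp_def]

-- inner loop lockstep: A folds the adjacency list of `state` appending to the popped queue
-- `q.drop j`; B folds the raw items appending to the cursor queue `q`
theorem pvInner_eq (state : String) (l : List (String × String × String))
    (pS pE : PySem.Dict String String) (parent : PySem.Dict String (String × String))
    (vis : PySem.Set String) (q : List String) (j : Nat)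
    (h : pvRel pS pE parent) (hj : j ≤ q.length) :
    pvRel (((l.filter (fun it => it.2.1 == state)).map
        (fun it => (it.2.2, it.1))).foldl (pvStepA state) (pS, pE, vis, q.drop j)).1
      (((l.filter (fun it => it.2.1 == state)).map
        (fun it => (it.2.2, it.1))).foldl (pvStepA state) (pS, pE, vis, q.drop j)).2.1
      (l.foldl (pvScanB state) (parent, vis, q)).1 ∧
    (l.foldl (pvScanB state) (parent, vis, q)).2.1 =
      (((l.filter (fun it => it.2.1 == state)).map
        (fun it => (it.2.2, it.1))).foldl (pvStepA state) (pS, pE, vis, q.drop j)).2.2.1 ∧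
    (l.foldl (pvScanB state) (parent, vis, q)).2.2.drop j =
      (((l.filter (fun it => it.2.1 == state)).map
        (fun it => (it.2.2, it.1))).foldl (pvStepA state) (pS, pE, vis, q.drop j)).2.2.2 ∧
    j ≤ (l.foldl (pvScanB state) (parent, vis, q)).2.2.length := by
  induction l generalizing pS pE parent vis q with
  | nil => exact ⟨h, rfl, rfl, hj⟩
  | cons it l ih =>
    by_cases h1 : (it.2.1 == state) = true
    · simp only [List.filter_cons, h1, if_true, List.map_cons, List.foldl_cons]
      by_cases h2 : PySem.Set.contains vis it.2.2 = true
      · simp only [pvStepA, pvScanB, h1, h2, Bool.not_true, Bool.and_false, if_true]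
        simp only [Bool.false_eq_true, if_false]
        exact ih pS pE parent vis q h hj
      · simp only [pvStepA, pvScanB, h1, Bool.not_eq_true] at h2 ⊢
        simp only [h2, Bool.not_false, Bool.and_true, if_true, if_false, Bool.false_eq_true]
        have hd : (q ++ [it.2.2]).drop j = q.drop j ++ [it.2.2] :=
          List.drop_append_of_le_length hj
        rw [← hd]
        refine ih _ _ _ _ _ ?_ (by simp; omega)
        intro c p0
        simp only [PySem.Dict.getD_insert]
        split
        · rfl
        · exact h c p0
    · simp only [List.filter_cons, h1, if_false, Bool.false_eq_true]
      have hB : pvScanB state (parent, vis, q) it = (parent, vis, q) := by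
        simp [pvScanB, h1]
      simp only [List.foldl_cons, hB]
      exact ih pS pE parent vis q h hj

-- outer loop lockstep: A's remaining queue is B's queue with the cursor dropped
theorem pvLoop_eq (items : List (String × String × String))
    (adj : PySem.Dict String (List (String × String)))
    (hadj : ∀ s, adj.getD s [] = (items.filter (fun it => it.2.1 == s)).map (fun it => (it.2.2, it.1)))
    (goal : String) (fuel : Nat) (q : List String) (i : Nat)
    (pS pE : PySem.Dict String String) (parent : PySem.Dict String (String × String))
    (vis : PySem.Set String) (h : pvRel pS pE parent) (hi : i ≤ q.length) :
    pvRel (pvLoopA adj goal fuel (q.drop i) pS pE vis).1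
        (pvLoopA adj goal fuel (q.drop i) pS pE vis).2.1
        (pvSearchB items goal fuel q i parent vis).1 ∧
      (pvSearchB items goal fuel q i parent vis).2 =
        (pvLoopA adj goal fuel (q.drop i) pS pE vis).2.2 := by
  induction fuel generalizing q i pS pE parent vis with
  | zero => exact ⟨h, rfl⟩
  | succ fuel ih =>
    rcases hq : q.drop i with _ | ⟨state, rest⟩
    · have hlen : ¬ i < q.length := by
        have := congrArg List.length hq
        simp [List.length_drop] at this; omega
      simp only [pvLoopA, pvSearchB]
      rw [if_neg (by simp [hlen])]
      exact ⟨h, rfl⟩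
    · have hlen : i < q.length := by
        by_contra hc
        rw [List.drop_eq_nil_of_le (by omega)] at hq; cases hq
      have hget : q.getD i "" = state := by
        have h0 : q[i]? = some state := by
          have : (q.drop i)[0]? = some state := by rw [hq]; rfl
          simpa [List.getElem?_drop] using this
        simp [List.getD, h0]
      simp only [pvLoopA, pvSearchB, hget]
      by_cases hg : (state == goal) = true
      · rw [if_pos hg, if_neg (by simp [hg])]
        exact ⟨h, rfl⟩
      · rw [if_neg hg, if_pos (by simp [hlen, hg])]
        have hrest : q.drop (i + 1) = rest := by
          have h1 : (List.drop i q).tail = List.drop (i + 1) q := List.tail_drop ..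
          rw [hq] at h1; exact h1.symm
        have hin := pvInner_eq state items pS pE parent vis q (i + 1) h (by omega)
        rw [hrest, ← hadj state] at hin
        obtain ⟨hrel, hvis, hqd, hle⟩ := hin
        simp only [← hvis, ← hqd]
        exact ih _ _ _ _ _ _ hrel hle

-- reconstruction: A's append-then-reverse walk equals B's forward recursion
theorem pvBack_eq (start : String) (pS pE : PySem.Dict String String)
    (parent : PySem.Dict String (String × String)) (h : pvRel pS pE parent)
    (fuel : Nat) (cur : String) (acc : List String) :
    pvBackA start pS pE fuel cur acc = pvWalkB start parent fuel cur ++ acc.reverse := by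
  induction fuel generalizing cur acc with
  | zero => simp [pvBackA, pvWalkB]
  | succ fuel ih =>
    by_cases hc : (cur == start) = true
    · simp [pvBackA, pvWalkB, hc]
    · simp only [pvBackA, pvWalkB, hc, Bool.false_eq_true, if_false, h cur ("", "")]
      rw [ih]
      simp

-- ===== VERDICT (by name: the statement is the Claim_ definition above) =====
theorem bfs_edge_path_spec : Claim_equal_bfs_edge_path := by
  intro start goal et _
  unfold Spec_bfs_edge_path
  show bfs_edge_path start goal et = bfs_edge_path_alt start goal et
  simp only [bfs_edge_path, bfs_edge_path_alt]
  have hrel0 : pvRel PySem.Dict.empty PySem.Dict.empty PySem.Dict.empty := by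
    intro c p0; simp [PySem.Dict.getD_empty]
  obtain ⟨hrel, hvis⟩ := pvLoop_eq (PySem.Dict.ofList et).items (pvAdjA et)
      (fun s => pvAdjA_getD et s) goal (et.length + 1) [start] 0
      PySem.Dict.empty PySem.Dict.empty PySem.Dict.empty
      (PySem.Set.ofList [start]) hrel0 (by simp)
  simp only [List.drop_zero] at hrel hvis
  rw [hvis]
  split
  · rw [pvBack_eq start _ _ _ hrel (et.length + 1) goal []]
    simp
  · rfl
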